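-- pv_equiv track=rewrite | github.com/shahuldxb/trade | Python/appp/services/moc_mapping_service.py | _build_data_element_prompt
-- ===== SOURCE A (Python) =====
-- from typing import Any, Dict, List, Optional
--
-- def _build_data_element_prompt(data_elements: List[Dict[str, Any]]) -> str:
--     grouped = {"MANDATORY": [], "OPTIONAL": [], "CONDITIONAL": []}
--     for item in data_elements or []:
--         name = _safe_text(item.get("data_element"))
--         if not name:
--             continue
--         description = _safe_text(item.get("description"))
--         criticality = _criticality_label(item.get("criticality"), item.get("criticality"))
--         line = f"- {name}" if not description else f"- {name}: {description}"
--         grouped.setdefault(criticality, []).append(line)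
--
--     sections = []
--     for key in ["MANDATORY", "OPTIONAL", "CONDITIONAL"]:
--         sections.append(f"{key.title()} Fields:")
--         lines = grouped.get(key, [])
--         if lines:
--             sections.extend(lines)
--         else:
--             sections.append("- (none listed)")
--         sections.append("")
--     return "\n".join(sections).strip()
--
-- def _safe_text(value: Any) -> str:
--     if value is None:
--         return ""
--     return str(value).strip()
--
-- def _criticality_label(status: str, criticality: str) -> str:
--     criticality_value = _safe_text(criticality).upper()
--     if criticality_value:
--         return criticality_value
--     status_value = _safe_text(status).upper()
--     mapping = {"M": "MANDATORY", "O": "OPTIONAL", "C": "CONDITIONAL"}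
--     return mapping.get(status_value, status_value)
-- ===== SOURCE B (Python) =====
-- # B: instead of one pass grouping into a dict, build each of the three fixed sections
-- # directly by filtering the element list per category label; simpler/idiomatic decomposition.
-- from typing import Any, Dict, List, Optional
--
--
-- def _safe_text(value: Any) -> str:
--     if value is None:
--         return ""
--     return str(value).strip()
--
--
-- def _criticality_label(status: str, criticality: str) -> str:
--     criticality_value = _safe_text(criticality).upper()
--     if criticality_value:
--         return criticality_value
--     status_value = _safe_text(status).upper()
--     mapping = {"M": "MANDATORY", "O": "OPTIONAL", "C": "CONDITIONAL"}
--     return mapping.get(status_value, status_value)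
--
--
-- def _section(data_elements: List[Dict[str, Any]], key: str) -> str:
--     body = []
--     for item in data_elements:
--         name = _safe_text(item.get("data_element"))
--         if not name:
--             continue
--         if _criticality_label(item.get("criticality"), item.get("criticality")) != key:
--             continue
--         description = _safe_text(item.get("description"))
--         body.append(f"- {name}: {description}" if description else f"- {name}")
--     return f"{key.title()} Fields:\n" + "\n".join(body or ["- (none listed)"])
--
--
-- def _build_data_element_prompt(data_elements: List[Dict[str, Any]]) -> str:
--     return "\n\n".join(
--         _section(data_elements or [], key)
--         for key in ("MANDATORY", "OPTIONAL", "CONDITIONAL")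
--     )
-- ===== Notes on version B (the rewrite author's own statement) =====
-- stated objective: simpler
-- what changed: A makes one pass populating a grouped dict keyed by criticality label and then walks the three fixed keys, padding/stripping a flat section-line list; B has no dict at all: for each of the three fixed category keys it filters the element list by that label and emits the section string directly, joining the three sections with blank lines.
import Mathlib
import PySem

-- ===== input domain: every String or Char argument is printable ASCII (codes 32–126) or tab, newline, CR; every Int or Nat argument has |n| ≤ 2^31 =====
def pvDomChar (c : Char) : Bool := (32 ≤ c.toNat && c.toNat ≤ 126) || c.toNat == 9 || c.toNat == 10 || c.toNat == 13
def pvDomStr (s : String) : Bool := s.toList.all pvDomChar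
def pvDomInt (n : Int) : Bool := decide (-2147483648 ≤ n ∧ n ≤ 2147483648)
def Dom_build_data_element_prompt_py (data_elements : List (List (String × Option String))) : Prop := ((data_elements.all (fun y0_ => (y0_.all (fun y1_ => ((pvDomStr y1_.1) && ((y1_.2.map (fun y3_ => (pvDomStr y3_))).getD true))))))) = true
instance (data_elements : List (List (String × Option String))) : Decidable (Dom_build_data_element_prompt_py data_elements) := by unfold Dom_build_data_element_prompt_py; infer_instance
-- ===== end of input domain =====

-- B replaces A's one-pass grouped-dict build with three direct per-category filtered scans (objective: simpler decomposition; same result).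

-- ===== PORT A =====
-- module helpers shared by both Python files (Source A and Source B define the same _safe_text/_criticality_label)

-- item.get(k): first matching key of the dict-as-association-list; None when absent or stored None
def pvGet (item : List (String × Option String)) (k : String) : Option String :=
  (item.find? (fun p => p.1 == k)).bind (fun p => p.2)

def pvSafeText (v : Option String) : String :=
  match v with
  | none => ""
  | some s => PySem.Str.strip s

def pvCritLabel (status criticality : Option String) : String :=
  let criticality_value := PySem.Str.upper (pvSafeText criticality)
  if criticality_value ≠ "" then criticality_value
  else
    let status_value := PySem.Str.upper (pvSafeText status)
    (PySem.Dict.ofList [("M", "MANDATORY"), ("O", "OPTIONAL"), ("C", "CONDITIONAL")]).getD status_value status_value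

-- str.title(), ported by hand (exact on ASCII: a letter is uppercased when the previous char is not a letter, lowercased otherwise)
def pvTitleAux : Bool → List Char → List Char
  | _, [] => []
  | prev, c :: cs =>
      let cased := PySem.Chars.isalpha c
      (if cased then (if prev then PySem.Chars.lowerChar c else PySem.Chars.upperChar c) else c) :: pvTitleAux cased cs

def pvTitle (s : String) : String := String.ofList (pvTitleAux false s.toList)

def build_data_element_prompt_py (data_elements : List (List (String × Option String))) : String :=
  let grouped0 : PySem.Dict String (List String) :=
    PySem.Dict.ofList [("MANDATORY", []), ("OPTIONAL", []), ("CONDITIONAL", [])]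
  let grouped := data_elements.foldl (fun g item =>
    let name := pvSafeText (pvGet item "data_element")
    if name = "" then g
    else
      let description := pvSafeText (pvGet item "description")
      let criticality := pvCritLabel (pvGet item "criticality") (pvGet item "criticality")
      let line := if description = "" then "- " ++ name else "- " ++ name ++ ": " ++ description
      -- grouped.setdefault(criticality, []).append(line) ≡ grouped[criticality] = grouped.get(criticality, []) + [line]
      g.modify criticality [] (fun ls => ls ++ [line])) grouped0
  let sections := ["MANDATORY", "OPTIONAL", "CONDITIONAL"].foldl (fun secs key =>
    let secs := secs ++ [pvTitle key ++ " Fields:"]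
    let lines := grouped.getD key []
    let secs := if lines ≠ [] then secs ++ lines else secs ++ ["- (none listed)"]
    secs ++ [""]) []
  PySem.Str.strip (PySem.Str.join "\n" sections)

-- ===== PORT B =====
def pvSection (data_elements : List (List (String × Option String))) (key : String) : String :=
  let body := data_elements.foldl (fun acc item =>
    let name := pvSafeText (pvGet item "data_element")
    if name = "" then acc
    else if pvCritLabel (pvGet item "criticality") (pvGet item "criticality") ≠ key then acc
    else
      let description := pvSafeText (pvGet item "description")
      acc ++ [if description ≠ "" then "- " ++ name ++ ": " ++ description else "- " ++ name]) []
  pvTitle key ++ " Fields:\n" ++ PySem.Str.join "\n" (if body = [] then ["- (none listed)"] else body)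

def build_data_element_prompt_py_alt (data_elements : List (List (String × Option String))) : String :=
  PySem.Str.join "\n\n" (["MANDATORY", "OPTIONAL", "CONDITIONAL"].map (pvSection data_elements))

-- ===== PRECONDITION & SPEC =====
def Spec_build_data_element_prompt_py (data_elements : List (List (String × Option String))) (out : String) : Prop := out = build_data_element_prompt_py_alt data_elements
instance (data_elements : List (List (String × Option String))) (out : String) : Decidable (Spec_build_data_element_prompt_py data_elements out) := by unfold Spec_build_data_element_prompt_py; infer_instance

-- ===== CLAIM (what is proved, stated in full; the proofs are below) =====
def Claim_equal_build_data_element_prompt_py : Prop := ∀ (data_elements : List (List (String × Option String))), Dom_build_data_element_prompt_py data_elements → Spec_build_data_element_prompt_py data_elements (build_data_element_prompt_py data_elements)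

-- ===== LEMMAS AND PROOFS =====

-- the per-item data both ports compute
def pvKeep (key : String) (item : List (String × Option String)) : Bool :=
  (pvSafeText (pvGet item "data_element") != "") &&
  (pvCritLabel (pvGet item "criticality") (pvGet item "criticality") == key)

def pvLineOf (item : List (String × Option String)) : String :=
  let name := pvSafeText (pvGet item "data_element")
  let description := pvSafeText (pvGet item "description")
  if description = "" then "- " ++ name else "- " ++ name ++ ": " ++ description

-- B's inner loop is the filtered, mapped scan
theorem pv_body_eq (de : List (List (String × Option String))) (key : String) :
    de.foldl (fun acc item =>
      let name := pvSafeText (pvGet item "data_element")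
      if name = "" then acc
      else if pvCritLabel (pvGet item "criticality") (pvGet item "criticality") ≠ key then acc
      else
        let description := pvSafeText (pvGet item "description")
        acc ++ [if description ≠ "" then "- " ++ name ++ ": " ++ description else "- " ++ name]) []
    = (de.filter (pvKeep key)).map pvLineOf := by
  have hstep : (fun (acc : List String) item =>
      let name := pvSafeText (pvGet item "data_element")
      if name = "" then acc
      else if pvCritLabel (pvGet item "criticality") (pvGet item "criticality") ≠ key then acc
      else
        let description := pvSafeText (pvGet item "description")
        acc ++ [if description ≠ "" then "- " ++ name ++ ": " ++ description else "- " ++ name])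
      = fun acc x => if pvKeep key x = true then acc ++ [pvLineOf x] else acc := by
    funext acc x
    simp only [pvKeep, pvLineOf]
    by_cases h1 : pvSafeText (pvGet x "data_element") = "" <;>
    by_cases h2 : pvCritLabel (pvGet x "criticality") (pvGet x "criticality") = key <;>
    by_cases h3 : pvSafeText (pvGet x "description") = "" <;>
    simp [h1, h2, h3]
  rw [hstep, PySem.List.foldl_append_if]
  simp

-- A's grouped-dict loop, characterised key-wise
theorem pv_grouped_getD (de : List (List (String × Option String)))
    (g : PySem.Dict String (List String)) (K : String) :
    (de.foldl (fun g item =>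
      let name := pvSafeText (pvGet item "data_element")
      if name = "" then g
      else
        let description := pvSafeText (pvGet item "description")
        let criticality := pvCritLabel (pvGet item "criticality") (pvGet item "criticality")
        let line := if description = "" then "- " ++ name else "- " ++ name ++ ": " ++ description
        g.modify criticality [] (fun ls => ls ++ [line])) g).getD K []
    = g.getD K [] ++ (de.filter (pvKeep K)).map pvLineOf := by
  induction de generalizing g with
  | nil => simp
  | cons x xs ih =>
    simp only [List.foldl_cons, List.filter_cons]
    rw [ih]
    have hx : (let name := pvSafeText (pvGet x "data_element")
        if name = "" then g
        else
          let description := pvSafeText (pvGet x "description")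
          let criticality := pvCritLabel (pvGet x "criticality") (pvGet x "criticality")
          let line := if description = "" then "- " ++ name else "- " ++ name ++ ": " ++ description
          g.modify criticality [] (fun ls => ls ++ [line])).getD K []
        = g.getD K [] ++ (if pvKeep K x then [pvLineOf x] else []) := by
      simp only [pvKeep, pvLineOf, PySem.Dict.modify]
      by_cases h1 : pvSafeText (pvGet x "data_element") = ""
      · simp [h1]
      · by_cases h2 : pvCritLabel (pvGet x "criticality") (pvGet x "criticality") = K
        · simp [h1, h2]
        · simp [h1, h2, PySem.Dict.getD_insert, Ne.symm h2]
    rw [hx]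
    by_cases hk : pvKeep K x <;> simp [hk]

theorem pv_grouped0_getD (K : String) :
    (PySem.Dict.ofList [("MANDATORY", ([] : List String)), ("OPTIONAL", []), ("CONDITIONAL", [])]).getD K [] = [] := by
  simp only [PySem.Dict.ofList, PySem.Dict.update, List.foldl_cons, List.foldl_nil]
  simp [PySem.Dict.getD_insert, PySem.Dict.getD_empty]

-- a kept line is nonempty and does not end in whitespace
def pvLineClean (s : String) : Prop :=
  ∃ c, s.toList.getLast? = some c ∧ PySem.Chars.isspace c = false

theorem pv_strip_getLast (t : String) (h : PySem.Str.strip t ≠ "") :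
    pvLineClean (PySem.Str.strip t) := by
  have hne : (PySem.Str.strip t).toList ≠ [] := by
    intro hcon
    exact h (String.toList_inj.mp hcon)
  rw [PySem.Str.toList_strip] at hne
  unfold pvLineClean
  rw [PySem.Str.toList_strip]
  unfold PySem.Chars.strip PySem.Chars.rstrip at hne
  unfold PySem.Chars.strip PySem.Chars.rstrip
  set X := List.dropWhile PySem.Chars.isspace (PySem.Chars.lstrip t.toList).reverse with hX
  have hXne : X ≠ [] := by
    intro hcon; rw [hcon] at hne; exact hne rfl
  refine ⟨X.head hXne, ?_, ?_⟩
  · rw [List.getLast?_reverse]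
    exact (List.head?_eq_some_head hXne)
  · exact List.head_dropWhile_not PySem.Chars.isspace hXne

theorem pv_lineOf_clean (item : List (String × Option String)) (key : String)
    (h : pvKeep key item = true) : pvLineClean (pvLineOf item) := by
  simp only [pvKeep, Bool.and_eq_true, bne_iff_ne, ne_eq, beq_iff_eq] at h
  obtain ⟨hname, -⟩ := h
  have hnm : ∃ u, pvGet item "data_element" = some u ∧
      pvSafeText (pvGet item "data_element") = PySem.Str.strip u := by
    cases hg : pvGet item "data_element" with
    | none => exact absurd (by simp [pvSafeText, hg]) hname
    | some u => exact ⟨u, rfl, by simp [pvSafeText]⟩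
  obtain ⟨u, -, hu⟩ := hnm
  unfold pvLineOf
  by_cases hd : pvSafeText (pvGet item "description") = ""
  · have hform : (let name := pvSafeText (pvGet item "data_element")
        let description := pvSafeText (pvGet item "description")
        if description = "" then "- " ++ name else "- " ++ name ++ ": " ++ description)
        = "- " ++ pvSafeText (pvGet item "data_element") := by
      simp [hd]
    rw [hform]
    have hcl := pv_strip_getLast u (hu ▸ hname)
    obtain ⟨c, hc, hcs⟩ := hcl
    refine ⟨c, ?_, hcs⟩
    rw [String.toList_append, List.getLast?_append_of_ne_nil]
    · rw [hu]; exact hc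
    · rw [hu] at hname ⊢
      intro hcon; exact hname (String.toList_inj.mp hcon)
  · have hform : (let name := pvSafeText (pvGet item "data_element")
        let description := pvSafeText (pvGet item "description")
        if description = "" then "- " ++ name else "- " ++ name ++ ": " ++ description)
        = ("- " ++ pvSafeText (pvGet item "data_element") ++ ": ") ++ pvSafeText (pvGet item "description") := by
      simp [hd]
    rw [hform]
    have hdm : ∃ w, pvSafeText (pvGet item "description") = PySem.Str.strip w := by
      cases hg : pvGet item "description" with
      | none => exact absurd (by simp [pvSafeText, hg]) hd
      | some w => exact ⟨w, by simp [pvSafeText]⟩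
    obtain ⟨w, hw⟩ := hdm
    have hcl := pv_strip_getLast w (hw ▸ hd)
    obtain ⟨c, hc, hcs⟩ := hcl
    refine ⟨c, ?_, hcs⟩
    rw [String.toList_append, List.getLast?_append_of_ne_nil]
    · rw [hw]; exact hc
    · rw [hw] at hd ⊢
      intro hcon; exact hd (String.toList_inj.mp hcon)

-- join over char lists
theorem pv_join_cons (sep x : List Char) (xs : List (List Char)) (h : xs ≠ []) :
    PySem.Chars.join sep (x :: xs) = x ++ sep ++ PySem.Chars.join sep xs := by
  cases xs with
  | nil => exact absurd rfl h
  | cons y ys => simp [PySem.Chars.join, List.intercalate, List.intersperse]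

theorem pv_join_append (sep : List Char) (xs ys : List (List Char)) (hx : xs ≠ []) (hy : ys ≠ []) :
    PySem.Chars.join sep (xs ++ ys) = PySem.Chars.join sep xs ++ sep ++ PySem.Chars.join sep ys := by
  induction xs with
  | nil => exact absurd rfl hx
  | cons x xs ih =>
    cases xs with
    | nil =>
      rw [List.singleton_append, pv_join_cons sep x ys hy]
      simp [PySem.Chars.join, List.intercalate]
    | cons x' xs' =>
      rw [List.cons_append, pv_join_cons sep x ((x' :: xs') ++ ys) (by simp),
        ih (by simp) , pv_join_cons sep x (x' :: xs') (by simp)]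
      simp [List.append_assoc]

theorem pv_join_getLast? (sep : List Char) (l : List (List Char)) (c : Char) (h : l ≠ [])
    (hl : (l.getLast h).getLast? = some c) : (PySem.Chars.join sep l).getLast? = some c := by
  induction l with
  | nil => exact absurd rfl h
  | cons x xs ih =>
    cases xs with
    | nil =>
      simp only [List.getLast_singleton] at hl
      simpa [PySem.Chars.join, List.intercalate] using hl
    | cons y ys =>
      rw [pv_join_cons sep x (y :: ys) (by simp)]
      rw [List.getLast_cons (by simp)] at hl
      have htail := ih (by simp) hl
      rw [List.getLast?_append_of_ne_nil]
      · exact htail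
      · intro hcon; rw [hcon] at htail; simp at htail

-- strip removes exactly the trailing '\n' of a string with non-space ends
theorem pv_strip_eval (R : List Char) (a : Char) (ha : R.head? = some a) (has : PySem.Chars.isspace a = false)
    (c : Char) (hc : R.getLast? = some c) (hcs : PySem.Chars.isspace c = false) :
    PySem.Chars.strip (R ++ ['\n']) = R := by
  unfold PySem.Chars.strip PySem.Chars.lstrip PySem.Chars.rstrip
  cases R with
  | nil => simp at ha
  | cons a0 R0 =>
    simp only [List.head?_cons, Option.some.injEq] at ha
    subst ha
    rw [List.cons_append, List.dropWhile_cons_of_neg (by simp [has])]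
    have h1 : (a0 :: (R0 ++ ['\n'])).reverse = '\n' :: (a0 :: R0).reverse := by simp
    rw [h1, List.dropWhile_cons_of_pos (by decide)]
    have hh : (a0 :: R0).reverse.head? = some c := by rw [List.head?_reverse]; exact hc
    cases hrev2 : (a0 :: R0).reverse with
    | nil => simp at hrev2
    | cons r rs =>
      rw [hrev2] at hh
      simp only [List.head?_cons, Option.some.injEq] at hh
      subst hh
      rw [List.dropWhile_cons_of_neg (by simp [hcs]), ← hrev2, List.reverse_reverse]

-- the assembled prompt, at the char level, generically in the three section bodies
theorem pv_chars_assemble (t1 t2 t3 : List Char) (g1 g2 g3 : List (List Char))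
    (a : Char) (h1 : t1.head? = some a) (has : PySem.Chars.isspace a = false)
    (hne1 : g1 ≠ []) (hne2 : g2 ≠ []) (hne3 : g3 ≠ [])
    (c : Char) (hg3 : (PySem.Chars.join ['\n'] g3).getLast? = some c) (hcs : PySem.Chars.isspace c = false) :
    PySem.Chars.strip (PySem.Chars.join ['\n']
      ([t1] ++ g1 ++ [[]] ++ [t2] ++ g2 ++ [[]] ++ [t3] ++ g3 ++ [[]]))
    = t1 ++ ['\n'] ++ PySem.Chars.join ['\n'] g1 ++ ['\n', '\n'] ++
      t2 ++ ['\n'] ++ PySem.Chars.join ['\n'] g2 ++ ['\n', '\n'] ++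
      t3 ++ ['\n'] ++ PySem.Chars.join ['\n'] g3 := by
  have hA : PySem.Chars.join ['\n'] ([t1] ++ g1 ++ [[]] ++ [t2] ++ g2 ++ [[]] ++ [t3] ++ g3)
      = t1 ++ ['\n'] ++ PySem.Chars.join ['\n'] g1 ++ ['\n', '\n'] ++
        t2 ++ ['\n'] ++ PySem.Chars.join ['\n'] g2 ++ ['\n', '\n'] ++
        t3 ++ ['\n'] ++ PySem.Chars.join ['\n'] g3 := by
    have e0 : [t1] ++ g1 ++ [[]] ++ [t2] ++ g2 ++ [[]] ++ [t3] ++ g3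
        = t1 :: (g1 ++ (([] : List Char) :: (t2 :: (g2 ++ (([] : List Char) :: (t3 :: g3)))))) := by
      simp
    rw [e0, pv_join_cons _ _ _ (by simp),
      pv_join_append _ g1 _ hne1 (by simp),
      pv_join_cons _ [] _ (by simp),
      pv_join_cons _ t2 _ (by simp),
      pv_join_append _ g2 _ hne2 (by simp),
      pv_join_cons _ [] _ (by simp),
      pv_join_cons _ t3 _ hne3]
    simp [List.append_assoc]
  have hL : [t1] ++ g1 ++ [[]] ++ [t2] ++ g2 ++ [[]] ++ [t3] ++ g3 ++ [[]]
      = ([t1] ++ g1 ++ [[]] ++ [t2] ++ g2 ++ [[]] ++ [t3] ++ g3) ++ [[]] := by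
    simp [List.append_assoc]
  have hjnil : PySem.Chars.join ['\n'] [[]] = [] := rfl
  rw [hL, pv_join_append _ _ [[]] (by simp) (by simp), hjnil, hA, List.append_nil]
  apply pv_strip_eval _ a _ has c _ hcs
  · simp [List.head?_append, h1]
  · rw [List.getLast?_append_of_ne_nil]
    · exact hg3
    · intro hcon; rw [hcon] at hg3; simp at hg3

-- the assembled prompt, at the String level
theorem pv_assemble (g1 g2 g3 : List String)
    (hne1 : g1 ≠ []) (hne2 : g2 ≠ []) (hne3 : g3 ≠ [])
    (h3 : ∀ s ∈ g3, pvLineClean s) :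
    PySem.Str.strip (PySem.Str.join "\n"
      ([pvTitle "MANDATORY" ++ " Fields:"] ++ g1 ++ [""] ++
       [pvTitle "OPTIONAL" ++ " Fields:"] ++ g2 ++ [""] ++
       [pvTitle "CONDITIONAL" ++ " Fields:"] ++ g3 ++ [""]))
    = PySem.Str.join "\n\n"
      [pvTitle "MANDATORY" ++ " Fields:\n" ++ PySem.Str.join "\n" g1,
       pvTitle "OPTIONAL" ++ " Fields:\n" ++ PySem.Str.join "\n" g2,
       pvTitle "CONDITIONAL" ++ " Fields:\n" ++ PySem.Str.join "\n" g3] := by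
  -- last element of g3 provides the non-space last char of the joined body
  have hlast : ∃ c, (PySem.Chars.join ['\n'] (g3.map String.toList)).getLast? = some c ∧
      PySem.Chars.isspace c = false := by
    obtain ⟨c, hc, hcs⟩ := h3 (g3.getLast hne3) (List.getLast_mem hne3)
    refine ⟨c, ?_, hcs⟩
    apply pv_join_getLast? _ _ _ (by simpa using hne3)
    rw [List.getLast_map]
    exact hc
  obtain ⟨c, hg3c, hcs⟩ := hlast
  rw [← String.toList_inj]
  simp only [PySem.Str.toList_strip, PySem.Str.toList_join, List.map_append, List.map_cons,
    List.map_nil, String.toList_append]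
  have hnl : ("\n").toList = ['\n'] := by decide
  have hnl2 : ("\n\n").toList = ['\n', '\n'] := by decide
  have hemp : (("") : String).toList = [] := by decide
  have hfn : (" Fields:\n").toList = (" Fields:").toList ++ ['\n'] := by decide
  have hM : (pvTitle "MANDATORY").toList.head? = some 'M' := by decide
  rw [hnl, hnl2, hemp, hfn]
  have hR : ∀ s1 s2 s3 : List Char, PySem.Chars.join ['\n', '\n'] [s1, s2, s3]
      = s1 ++ ['\n', '\n'] ++ s2 ++ ['\n', '\n'] ++ s3 := by
    intro s1 s2 s3
    rw [pv_join_cons _ _ _ (by simp), pv_join_cons _ _ _ (by simp)]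
    simp [PySem.Chars.join, List.intercalate]
  rw [hR]
  have := pv_chars_assemble
    ((pvTitle "MANDATORY").toList ++ (" Fields:").toList)
    ((pvTitle "OPTIONAL").toList ++ (" Fields:").toList)
    ((pvTitle "CONDITIONAL").toList ++ (" Fields:").toList)
    (g1.map String.toList) (g2.map String.toList) (g3.map String.toList)
    'M' (by simp [List.head?_append, hM]) (by decide)
    (by simpa using hne1) (by simpa using hne2) (by simpa using hne3)
    c hg3c hcs
  simp only [List.append_assoc] at this ⊢
  exact this

-- ===== VERDICT (by name: the statement is the Claim_ definition above) =====
theorem build_data_element_prompt_py_spec : Claim_equal_build_data_element_prompt_py := by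
  intro de _
  unfold Spec_build_data_element_prompt_py build_data_element_prompt_py build_data_element_prompt_py_alt pvSection
  simp only [List.foldl_cons, List.foldl_nil, List.map_cons, List.map_nil,
    pv_body_eq, pv_grouped_getD, pv_grouped0_getD, List.nil_append]
  have hclean : ∀ K, ∀ s ∈ (de.filter (pvKeep K)).map pvLineOf, pvLineClean s := by
    intro K s hs
    obtain ⟨x, hx, rfl⟩ := List.mem_map.mp hs
    exact pv_lineOf_clean x K (List.of_mem_filter hx)
  have hnone : pvLineClean "- (none listed)" := ⟨')', by decide, by decide⟩
  have hpush : ∀ (X d b : List String), (if b ≠ [] then X ++ b else X ++ d) = X ++ (if b = [] then d else b) := by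
    intro X d b; by_cases h : b = [] <;> simp [h]
  simp only [hpush]
  have H := pv_assemble
    (if (de.filter (pvKeep "MANDATORY")).map pvLineOf = [] then ["- (none listed)"]
      else (de.filter (pvKeep "MANDATORY")).map pvLineOf)
    (if (de.filter (pvKeep "OPTIONAL")).map pvLineOf = [] then ["- (none listed)"]
      else (de.filter (pvKeep "OPTIONAL")).map pvLineOf)
    (if (de.filter (pvKeep "CONDITIONAL")).map pvLineOf = [] then ["- (none listed)"]
      else (de.filter (pvKeep "CONDITIONAL")).map pvLineOf)
    (by split <;> simp_all) (by split <;> simp_all) (by split <;> simp_all)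
    (by split
        · intro s hs
          simp only [List.mem_singleton] at hs
          subst hs; exact hnone
        · exact hclean "CONDITIONAL")
  simp only [List.append_assoc] at H ⊢
  exact H
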